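-- pv_equiv track=rewrite | github.com/244912/Functions | 7.20/prime.py | f
-- ===== SOURCE A (Python) =====
-- def f(n):
--     if n == 1:
--         return 2
--
--     liczba = 3          # zaczynamy od pierwszej nieparzystej liczby po 2
--     znalezione = 1      # już mamy jedną liczbę pierwszą (czyli 2)
--
--     while znalezione < n:
--         # sprawdzamy, czy liczba jest pierwsza
--         jest_pierwsza = True
--
--         for i in range(3, liczba, 2):  # sprawdzamy tylko nieparzyste dzielniki
--             if i * i > liczba:         # nie musimy sprawdzać dalej niż sqrt(liczba)
--                 break
--             if liczba % i == 0:
--                 jest_pierwsza = False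
--                 break
--
--         if jest_pierwsza:
--             znalezione = znalezione + 1
--             if znalezione == n:
--                 return liczba
--
--         liczba = liczba + 2    # następna nieparzysta liczba
-- ===== SOURCE B (Python) =====
-- def f(n):
--     if n < 1:
--         return None
--     primes = [2]
--     m = 3
--     while len(primes) < n:
--         is_prime = True
--         for p in primes:
--             if p * p > m:
--                 break
--             if m % p == 0:
--                 is_prime = False
--                 break
--         if is_prime:
--             primes.append(m)
--         m += 2
--     return primes[n - 1]
-- ===== Notes on version B (the rewrite author's own statement) =====
-- stated objective: alternative
-- what changed: B keeps a growing list of the primes found so far and trial-divides each odd candidate only by those primes (up to sqrt), returning the nth entry of the list, instead of A's re-testing every candidate against all odd numbers up to sqrt.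
-- outside the precondition, e.g. on f(0): A returns None, B returns None
import Mathlib
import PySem

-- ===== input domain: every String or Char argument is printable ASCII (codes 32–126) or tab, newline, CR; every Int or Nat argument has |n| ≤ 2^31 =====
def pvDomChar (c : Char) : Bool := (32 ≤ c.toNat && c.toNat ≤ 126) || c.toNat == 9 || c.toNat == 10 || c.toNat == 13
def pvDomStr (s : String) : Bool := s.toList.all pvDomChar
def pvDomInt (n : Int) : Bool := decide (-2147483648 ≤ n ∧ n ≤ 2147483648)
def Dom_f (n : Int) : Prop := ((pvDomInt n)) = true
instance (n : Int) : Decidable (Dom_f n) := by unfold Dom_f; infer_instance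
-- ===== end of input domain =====

-- B finds the nth prime by trial-dividing each odd candidate only by the primes found so far
-- (kept in a list, returned by index) instead of A's trial division by all odd numbers up to sqrt.

-- ===== PORT A =====
-- inner 'for i in range(3, liczba, 2)' with its two breaks
def f_checkA : List Int → Int → Bool
  | [], _ => true
  | i :: rest, liczba =>
    if i * i > liczba then true
    else if PySem.Int.mod liczba i == 0 then false
    else f_checkA rest liczba

-- the 'while znalezione < n' loop; fuel only makes the recursion total (proved never to matter
-- for the claim: both ports get the same fuel and agree step for step).
-- falling out of the while loop (znalezione ≥ n) is Python's implicit 'return None': default 0, outside Pre_.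
def f_loopA (n : Int) : Nat → Int → Int → Int
  | 0, _, _ => 0
  | fuel+1, liczba, znalezione =>
    if znalezione < n then
      if f_checkA (PySem.List.pyRange 3 liczba 2) liczba then
        if znalezione + 1 == n then liczba
        else f_loopA n fuel (liczba + 2) (znalezione + 1)
      else f_loopA n fuel (liczba + 2) znalezione
    else 0

def f (n : Int) : Int :=
  if n == 1 then 2 else f_loopA n (2 ^ n.toNat) 3 1

-- ===== PORT B =====
-- 'for p in primes' with its two breaks
def f_checkB : List Int → Int → Bool
  | [], _ => true
  | p :: rest, m =>
    if p * p > m then true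
    else if PySem.Int.mod m p == 0 then false
    else f_checkB rest m

-- 'while len(primes) < n': returns the final primes list
def f_loopB (n : Int) : Nat → List Int → Int → List Int
  | 0, primes, _ => primes
  | fuel+1, primes, m =>
    if (primes.length : Int) < n then
      f_loopB n fuel (if f_checkB primes m then primes ++ [m] else primes) (m + 2)
    else primes

def f_alt (n : Int) : Int :=
  if n < 1 then 0   -- Python B returns None here, like A; outside Pre_
  else (PySem.List.pyGet? (f_loopB n (2 ^ n.toNat) [2] 3) (n - 1)).getD 0

-- ===== PRECONDITION & SPEC =====
-- For n ≤ 0 the Python A falls off the while loop and returns None, not an int: excluded.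
def Pre_f (n : Int) : Prop := 1 ≤ n
instance (n : Int) : Decidable (Pre_f n) := by unfold Pre_f; infer_instance
def pvWitness_f : Int := 5

def Spec_f (n : Int) (out : Int) : Prop := out = f_alt n
instance (n : Int) (out : Int) : Decidable (Spec_f n out) := by unfold Spec_f; infer_instance

-- ===== CLAIM (what is proved, stated in full; the proofs are below) =====
def Claim_equal_f : Prop := ∀ (n : Int), Dom_f n → Pre_f n → Spec_f n (f n)

-- ===== LEMMAS AND PROOFS =====

-- the primes below M, in increasing order, as Ints: B's 'primes' list when the candidate is M
def primesBelow (M : Nat) : List Int :=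
  ((List.range M).filter (fun k => decide (Nat.Prime k))).map (fun k : Nat => (k : Int))

lemma checkB_eq_checkA (L : List Int) (m : Int) : f_checkB L m = f_checkA L m := by
  induction L with
  | nil => rfl
  | cons i rest ih => simp [f_checkA, f_checkB, ih]

-- the shared scan shape: on a sorted positive list, the break-at-sqrt scan decides
-- "no element ≤ sqrt m divides m"
lemma checkA_spec (L : List Int) (m : Int) (hpos : ∀ i ∈ L, 0 < i)
    (hsort : L.Pairwise (· ≤ ·)) :
    f_checkA L m = true ↔ ∀ i ∈ L, i * i ≤ m → ¬ (i ∣ m) := by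
  induction L with
  | nil => simp [f_checkA]
  | cons i rest ih =>
    have hi : 0 < i := hpos i List.mem_cons_self
    have hrest : ∀ j ∈ rest, 0 < j := fun j hj => hpos j (List.mem_cons_of_mem _ hj)
    have hle : ∀ j ∈ rest, i ≤ j := (List.pairwise_cons.mp hsort).1
    have ihr := ih hrest (List.pairwise_cons.mp hsort).2
    by_cases hsq : i * i > m
    · rw [show f_checkA (i :: rest) m = true from by rw [f_checkA, if_pos hsq]]
      simp only [true_iff]
      intro j hj hjj
      exfalso
      rcases List.mem_cons.mp hj with hj | hj
      · subst hj; omega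
      · have hij := hle j hj
        nlinarith
    · by_cases hdvd : i ∣ m
      · have hm0 : (PySem.Int.mod m i == 0) = true := by
          simp [PySem.Int.mod_eq_zero_iff_dvd, hdvd]
        rw [show f_checkA (i :: rest) m = false from by
          rw [f_checkA, if_neg hsq, if_pos hm0]]
        simp only [Bool.false_eq_true, false_iff]
        intro h
        exact h i List.mem_cons_self (by omega) hdvd
      · have hm0 : ¬ ((PySem.Int.mod m i == 0) = true) := by
          simp [PySem.Int.mod_eq_zero_iff_dvd, hdvd]
        rw [show f_checkA (i :: rest) m = f_checkA rest m from by
          rw [f_checkA, if_neg hsq, if_neg hm0]]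
        rw [ihr]
        constructor
        · intro h j hj hjj
          rcases List.mem_cons.mp hj with hj | hj
          · subst hj; exact hdvd
          · exact h j hj hjj
        · intro h j hj hjj
          exact h j (List.mem_cons_of_mem _ hj) hjj

-- the least factor of an odd composite m ≥ 3 is an odd prime p with p² ≤ m
lemma minFac_witness (m : Int) (h3 : 3 ≤ m) (hodd : m % 2 = 1)
    (hnp : ¬ Nat.Prime m.toNat) :
    ∃ p : Nat, Nat.Prime p ∧ 3 ≤ p ∧ p % 2 = 1 ∧
      (p : Int) * (p : Int) ≤ m ∧ (p : Int) < m ∧ (p : Int) ∣ m := by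
  have hm : (m.toNat : Int) = m := by omega
  have hne1 : m.toNat ≠ 1 := by omega
  have hpp : Nat.Prime m.toNat.minFac := Nat.minFac_prime hne1
  have hpd : m.toNat.minFac ∣ m.toNat := Nat.minFac_dvd _
  have hsq : m.toNat.minFac * m.toNat.minFac ≤ m.toNat := by
    have := Nat.minFac_sq_le_self (by omega) hnp
    simpa [pow_two] using this
  have hp2 : m.toNat.minFac ≠ 2 := by
    intro h2
    have : (2 : Nat) ∣ m.toNat := h2 ▸ hpd
    omega
  have hpodd : m.toNat.minFac % 2 = 1 := by
    rcases hpp.eq_two_or_odd with h | h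
    · exact absurd h hp2
    · exact h
  have hp3 : 3 ≤ m.toNat.minFac := by
    have := hpp.two_le; omega
  have hsq' : ((m.toNat.minFac : Int)) * (m.toNat.minFac : Int) ≤ m := by
    rw [← hm]; exact_mod_cast hsq
  refine ⟨m.toNat.minFac, hpp, hp3, hpodd, hsq', by nlinarith, ?_⟩
  rw [← hm]; exact_mod_cast hpd

lemma noSmallOddDvd_iff_prime (m : Int) (h3 : 3 ≤ m) (hodd : m % 2 = 1) :
    (∀ x : Int, 3 ≤ x → x < m → (2 : Int) ∣ x - 3 → x * x ≤ m → ¬ (x ∣ m)) ↔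
    Nat.Prime m.toNat := by
  have hm : (m.toNat : Int) = m := by omega
  constructor
  · intro h
    by_contra hnp
    obtain ⟨p, _, hp3, hpodd, hsq, hplt, hpdvd⟩ := minFac_witness m h3 hodd hnp
    exact h (p : Int) (by exact_mod_cast hp3) hplt (by omega) hsq hpdvd
  · intro hpr x hx3 hxm _ hxx hdvd
    have hxd : x.toNat ∣ m.toNat := by
      have hx : ((x.toNat : Int)) ∣ ((m.toNat : Int)) := by
        rw [hm, (by omega : (x.toNat : Int) = x)]; exact hdvd
      exact_mod_cast hx
    rcases hpr.eq_one_or_self_of_dvd _ hxd with h1 | h1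
    · omega
    · omega

lemma checkA_iff_prime (m : Int) (h3 : 3 ≤ m) (hodd : m % 2 = 1) :
    f_checkA (PySem.List.pyRange 3 m 2) m = true ↔ Nat.Prime m.toNat := by
  have hpos : ∀ i ∈ PySem.List.pyRange 3 m 2, 0 < i := by
    intro i hi
    have := (PySem.List.mem_pyRange_iff_of_pos (by norm_num) i).mp hi
    omega
  have hsort : (PySem.List.pyRange 3 m 2).Pairwise (· ≤ ·) := by
    rw [PySem.List.pyRange_of_pos _ _ (by norm_num)]
    refine List.Pairwise.map _ (fun a b hab => ?_) List.pairwise_lt_range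
    omega
  rw [checkA_spec _ _ hpos hsort, ← noSmallOddDvd_iff_prime m h3 hodd]
  constructor
  · intro h x hx3 hxm hdvd2 hxx
    exact h x ((PySem.List.mem_pyRange_iff_of_pos (by norm_num) x).mpr
      ⟨hx3, hxm, hdvd2⟩) hxx
  · intro h i hi hii
    have hmem := (PySem.List.mem_pyRange_iff_of_pos (by norm_num) i).mp hi
    exact h i hmem.1 hmem.2.1 hmem.2.2 hii

lemma mem_primesBelow (M : Nat) (x : Int) :
    x ∈ primesBelow M ↔ 0 ≤ x ∧ x < (M : Int) ∧ Nat.Prime x.toNat := by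
  unfold primesBelow
  simp only [List.mem_map, List.mem_filter, List.mem_range, decide_eq_true_eq]
  constructor
  · rintro ⟨k, ⟨hk, hkp⟩, rfl⟩
    exact ⟨by positivity, by exact_mod_cast hk, by simpa using hkp⟩
  · rintro ⟨h0, hlt, hp⟩
    exact ⟨x.toNat, ⟨by omega, hp⟩, by omega⟩

lemma checkB_iff_prime (m : Int) (h3 : 3 ≤ m) (hodd : m % 2 = 1) :
    f_checkB (primesBelow m.toNat) m = true ↔ Nat.Prime m.toNat := by
  have hm : (m.toNat : Int) = m := by omega
  have hpos : ∀ i ∈ primesBelow m.toNat, 0 < i := by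
    intro i hi
    have := ((mem_primesBelow _ i).mp hi).2.2.two_le
    omega
  have hsort : (primesBelow m.toNat).Pairwise (· ≤ ·) := by
    unfold primesBelow
    refine List.Pairwise.map _ (fun a b hab => ?_)
      (List.Pairwise.filter _ List.pairwise_lt_range)
    exact_mod_cast le_of_lt hab
  rw [checkB_eq_checkA, checkA_spec _ _ hpos hsort]
  constructor
  · intro h
    by_contra hnp
    obtain ⟨p, hpp, hp3, _, hsq, hplt, hpdvd⟩ := minFac_witness m h3 hodd hnp
    refine h (p : Int) ((mem_primesBelow _ _).mpr ⟨by positivity, by rw [hm] at *; omega, by simpa using hpp⟩) hsq hpdvd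
  · intro hpr x hx hxx hdvd
    obtain ⟨hx0, hxm, hxp⟩ := (mem_primesBelow _ x).mp hx
    rw [hm] at hxm
    have hxd : x.toNat ∣ m.toNat := by
      have hxc : ((x.toNat : Int)) ∣ ((m.toNat : Int)) := by
        rw [hm, (by omega : (x.toNat : Int) = x)]; exact hdvd
      exact_mod_cast hxc
    have h2 := hxp.two_le
    rcases hpr.eq_one_or_self_of_dvd _ hxd with h1 | h1
    · omega
    · omega

lemma primesBelow_step (m : Int) (h3 : 3 ≤ m) (hodd : m % 2 = 1) :
    primesBelow (m + 2).toNat =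
      primesBelow m.toNat ++ (if Nat.Prime m.toNat then [m] else []) := by
  have hM : (m + 2).toNat = m.toNat + 2 := by omega
  have hnp : ¬ Nat.Prime (m.toNat + 1) := by
    intro h
    have he : Even (m.toNat + 1) := Nat.even_iff.mpr (by omega)
    have := (Nat.Prime.even_iff h).mp he
    omega
  rw [hM]
  unfold primesBelow
  rw [show m.toNat + 2 = (m.toNat + 1) + 1 from rfl, List.range_succ, List.range_succ]
  rw [List.filter_append, List.filter_append, List.map_append, List.map_append]
  have h1 : (List.filter (fun k => decide (Nat.Prime k)) [m.toNat + 1]) = [] := by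
    simp [hnp]
  rw [h1]
  by_cases hp : Nat.Prime m.toNat
  · simp [hp, (by omega : ((m.toNat : Int)) = m)]
  · simp [hp]

lemma loopB_stop (n : Int) (fuel : Nat) (ps : List Int) (m : Int)
    (h : ¬ ((ps.length : Int) < n)) : f_loopB n fuel ps m = ps := by
  cases fuel with
  | zero => rfl
  | succ k => simp [f_loopB, h]

lemma pyGet?_big {xs : List Int} {i : Int} (h0 : 0 ≤ i) (h : (xs.length : Int) ≤ i) :
    PySem.List.pyGet? xs i = none := by
  simp [PySem.List.pyGet?, PySem.List.pyIdx?, h0]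
  omega

lemma pyGet?_last (xs : List Int) (x : Int) (i : Int) (h : i = (xs.length : Int)) :
    PySem.List.pyGet? (xs ++ [x]) i = some x := by
  subst h
  simp [PySem.List.pyGet?, PySem.List.pyIdx?]

lemma main_loop (fuel : Nat) : ∀ (n m : Int), 3 ≤ m → m % 2 = 1 → 1 ≤ n →
    ((primesBelow m.toNat).length : Int) < n →
    f_loopA n fuel m ((primesBelow m.toNat).length) =
      (PySem.List.pyGet? (f_loopB n fuel (primesBelow m.toNat) m) (n - 1)).getD 0 := by
  induction fuel with
  | zero =>
    intro n m h3 hodd hn hlt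
    simp only [f_loopA, f_loopB]
    rw [pyGet?_big (by omega) (by omega)]
    rfl
  | succ fuel ih =>
    intro n m h3 hodd hn hlt
    rw [show f_loopB n (fuel + 1) (primesBelow m.toNat) m =
        f_loopB n fuel (if f_checkB (primesBelow m.toNat) m then
          primesBelow m.toNat ++ [m] else primesBelow m.toNat) (m + 2) from by
      rw [f_loopB, if_pos hlt]]
    by_cases hp : f_checkA (PySem.List.pyRange 3 m 2) m = true
    · -- m is prime
      have hpm : Nat.Prime m.toNat := (checkA_iff_prime m h3 hodd).mp hp
      have hck : f_checkB (primesBelow m.toNat) m = true :=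
        (checkB_iff_prime m h3 hodd).mpr hpm
      have hstep : primesBelow (m + 2).toNat = primesBelow m.toNat ++ [m] := by
        rw [primesBelow_step m h3 hodd, if_pos hpm]
      rw [if_pos hck]
      by_cases heq : ((primesBelow m.toNat).length : Int) + 1 = n
      · have hbeq : ((((primesBelow m.toNat).length : Int) + 1 == n)) = true := by
          simp [heq]
        rw [show f_loopA n (fuel + 1) m ((primesBelow m.toNat).length : Int) = m from by
          rw [f_loopA, if_pos hlt, if_pos hp, if_pos hbeq]]
        rw [loopB_stop _ _ _ _ (by simp only [List.length_append, List.length_cons, List.length_nil]; push_cast; omega)]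
        rw [pyGet?_last _ _ _ (by omega)]
        rfl
      · have hbeq : ¬ (((((primesBelow m.toNat).length : Int) + 1 == n)) = true) := by
          simp [heq]
        rw [show f_loopA n (fuel + 1) m ((primesBelow m.toNat).length : Int) =
            f_loopA n fuel (m + 2) (((primesBelow m.toNat).length : Int) + 1) from by
          rw [f_loopA, if_pos hlt, if_pos hp, if_neg hbeq]]
        have h3' : (3 : Int) ≤ m + 2 := by omega
        have hodd' : (m + 2) % 2 = 1 := by omega
        have hres := ih n (m + 2) h3' hodd' hn
        rw [hstep] at hres
        have hlen : ((primesBelow m.toNat ++ [m]).length : Int) =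
            ((primesBelow m.toNat).length : Int) + 1 := by
          simp
        rw [hlen] at hres
        exact hres (by omega)
    · -- m is not prime
      have hpm : ¬ Nat.Prime m.toNat := fun h =>
        hp ((checkA_iff_prime m h3 hodd).mpr h)
      have hck : ¬ (f_checkB (primesBelow m.toNat) m = true) := fun h =>
        hpm ((checkB_iff_prime m h3 hodd).mp h)
      rw [if_neg hck]
      rw [show f_loopA n (fuel + 1) m ((primesBelow m.toNat).length : Int) =
          f_loopA n fuel (m + 2) ((primesBelow m.toNat).length : Int) from by
        rw [f_loopA, if_pos hlt, if_neg hp]]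
      have hstep : primesBelow (m + 2).toNat = primesBelow m.toNat := by
        rw [primesBelow_step m h3 hodd, if_neg hpm]; simp
      have hres := ih n (m + 2) (by omega) (by omega) hn
      rw [hstep] at hres
      exact hres hlt

-- ===== VERDICT (by name: the statement is the Claim_ definition above) =====
theorem f_spec : Claim_equal_f := by
  intro n _ hpre
  unfold Spec_f f f_alt
  have hpre' : (1 : Int) ≤ n := hpre
  by_cases h1 : n = 1
  · subst h1; decide
  · have : (n == 1) = false := by simp [h1]
    rw [this]
    simp only [Bool.false_eq_true, if_false]
    have : ¬ (n < 1) := by omega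
    rw [if_neg this]
    have hps : primesBelow 3 = [2] := by decide
    have hlen : ((primesBelow 3).length : Int) = 1 := by rw [hps]; rfl
    have := main_loop (2 ^ n.toNat) n 3 (by omega) (by decide) hpre'
      (by rw [(by decide : (3:Int).toNat = 3), hlen]; omega)
    rw [(by decide : (3:Int).toNat = 3), hlen] at this
    rw [this, hps]
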